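-- pv_equiv track=rewrite | github.com/MobleyLab/blues | blues/icdart/dartnew.py | addSet
-- ===== SOURCE A (Python) =====
-- def addSet(set_list):
--     add_return = None
--     for i in set_list:
--         if add_return is None:
--             add_return = i
--         elif i != None:
--             add_return = add_return + i
--     return add_return
-- ===== SOURCE B (Python) =====
-- def _dc(vals):
--     # divide-and-conquer sum of a nonempty list
--     if len(vals) == 1:
--         return vals[0]
--     m = len(vals) // 2
--     return _dc(vals[:m]) + _dc(vals[m:])
--
-- def addSet(set_list):
--     if not set_list:
--         return None
--     return _dc(list(set_list))
-- ===== Notes on version B (the rewrite author's own statement) =====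
-- stated objective: alternative
-- what changed: Replaced A's single left-to-right Option-accumulator fold by an emptiness check plus a recursive divide-and-conquer summation that splits the list in halves and adds the two recursive sums.
import Mathlib
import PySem

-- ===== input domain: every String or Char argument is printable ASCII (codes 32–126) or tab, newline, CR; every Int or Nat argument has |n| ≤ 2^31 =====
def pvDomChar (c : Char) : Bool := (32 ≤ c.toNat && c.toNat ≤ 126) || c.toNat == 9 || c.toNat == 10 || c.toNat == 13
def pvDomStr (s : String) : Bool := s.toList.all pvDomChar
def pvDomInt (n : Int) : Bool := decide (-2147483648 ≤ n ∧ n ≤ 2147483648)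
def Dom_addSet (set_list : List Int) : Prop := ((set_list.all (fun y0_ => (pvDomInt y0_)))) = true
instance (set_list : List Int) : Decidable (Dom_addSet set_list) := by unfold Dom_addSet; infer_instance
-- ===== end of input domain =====

-- B replaces A's left-to-right Option-accumulator fold by an emptiness check plus a
-- divide-and-conquer summation (split in halves, add the two recursive sums).

-- ===== PORT A =====
-- A folds over the list with an Option accumulator seeded with None.
-- On Int elements the `elif i != None` branch condition is always true (an Int never equals None).
def addSet (set_list : List Int) : Option Int :=
  set_list.foldl
    (fun add_return i =>
      match add_return with
      | none => some i          -- if add_return is None: add_return = i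
      | some a => some (a + i)  -- elif i != None (always true for an Int): add_return = add_return + i
    ) none

-- ===== PORT B =====
-- _dc: divide-and-conquer sum of a nonempty list (vals[:m] / vals[m:] ported as take/drop)
def dcSum : List Int → Int
  | [] => 0            -- unreachable for the nonempty lists _dc is called on
  | [x] => x
  | x :: y :: t =>
      let m := (x :: y :: t).length / 2
      dcSum ((x :: y :: t).take m) + dcSum ((x :: y :: t).drop m)
termination_by l => l.length
decreasing_by
  · simp [List.length_take]; omega
  · simp; omega

-- if not set_list: return None ; return _dc(list(set_list))
def addSet_alt (set_list : List Int) : Option Int :=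
  if set_list.isEmpty then none
  else some (dcSum set_list)

-- ===== PRECONDITION & SPEC =====
def Spec_addSet (set_list : List Int) (out : Option Int) : Prop := out = addSet_alt set_list
instance (set_list : List Int) (out : Option Int) : Decidable (Spec_addSet set_list out) := by unfold Spec_addSet; infer_instance

-- ===== CLAIM (what is proved, stated in full; the proofs are below) =====
def Claim_equal_addSet : Prop := ∀ (set_list : List Int), Dom_addSet set_list → Spec_addSet set_list (addSet set_list)

-- ===== LEMMAS AND PROOFS =====
theorem dcSum_eq_sum (l : List Int) : dcSum l = l.sum := by
  fun_induction dcSum with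
  | case1 => rfl
  | case2 x => simp
  | case3 x y t m ih1 ih2 =>
      rw [ih1, ih2, ← List.sum_append, List.take_append_drop]

theorem addSet_foldl_some (l : List Int) (a : Int) :
    l.foldl
      (fun add_return i =>
        match add_return with
        | none => some i
        | some b => some (b + i)) (some a) = some (a + l.sum) := by
  induction l generalizing a with
  | nil => simp
  | cons x xs ih => simp [List.foldl, ih (a + x)]; ring

-- ===== VERDICT (by name: the statement is the Claim_ definition above) =====
theorem addSet_spec : Claim_equal_addSet := by
  intro set_list _
  unfold Spec_addSet addSet addSet_alt
  cases set_list with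
  | nil => rfl
  | cons x xs =>
      simp [addSet_foldl_some xs x, dcSum_eq_sum]
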